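-- pv_equiv track=rewrite | github.com/intelligentnode/Intelli | intelli/flow/utils/dynamic_utils.py | text_length_router
-- ===== SOURCE A (Python) =====
-- from typing import Any, Dict, List, Optional
--
-- def text_length_router(
--     output: Any, output_type: str, thresholds: List[int], destinations: List[str]
-- ) -> str:
--     """
--     Routes based on the length of text output.
--
--     Args:
--         output: The text output
--         output_type: The type of the output (should be "text")
--         thresholds: List of length thresholds in ascending order (e.g., [100, 500])
--         destinations: List of destination keys corresponding to thresholds + 1
--             (e.g., ["short", "medium", "long"])
--
--     Returns:
--         The appropriate destination key based on text length
--     """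
--     if output_type != "text":
--         return destinations[-1]  # Default to last destination for non-text
--
--     if not isinstance(output, str):
--         return destinations[-1]
--
--     length = len(output)
--
--     for i, threshold in enumerate(thresholds):
--         if length <= threshold:
--             return destinations[i]
--
--     return destinations[-1]  # If longer than all thresholds
-- ===== SOURCE B (Python) =====
-- def text_length_router(output, output_type, thresholds, destinations):
--     """Backward overwrite-fold over zip(thresholds, destinations) instead of an
--     indexed forward scan; return value only (no mutation)."""
--     if output_type != "text" or not isinstance(output, str):
--         return destinations[-1]
--     length = len(output)
--     result = destinations[-1]
--     for threshold, destination in reversed(list(zip(thresholds, destinations))):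
--         if length <= threshold:
--             result = destination
--     return result
-- ===== Notes on version B (the rewrite author's own statement) =====
-- stated objective: alternative
-- what changed: A's indexed forward scan with early return (enumerate + destinations[i]) is replaced by a single backward overwrite-fold over reversed(zip(thresholds, destinations)) starting from the default destination, which needs no indices and is correct even on unsorted thresholds.
import Mathlib
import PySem

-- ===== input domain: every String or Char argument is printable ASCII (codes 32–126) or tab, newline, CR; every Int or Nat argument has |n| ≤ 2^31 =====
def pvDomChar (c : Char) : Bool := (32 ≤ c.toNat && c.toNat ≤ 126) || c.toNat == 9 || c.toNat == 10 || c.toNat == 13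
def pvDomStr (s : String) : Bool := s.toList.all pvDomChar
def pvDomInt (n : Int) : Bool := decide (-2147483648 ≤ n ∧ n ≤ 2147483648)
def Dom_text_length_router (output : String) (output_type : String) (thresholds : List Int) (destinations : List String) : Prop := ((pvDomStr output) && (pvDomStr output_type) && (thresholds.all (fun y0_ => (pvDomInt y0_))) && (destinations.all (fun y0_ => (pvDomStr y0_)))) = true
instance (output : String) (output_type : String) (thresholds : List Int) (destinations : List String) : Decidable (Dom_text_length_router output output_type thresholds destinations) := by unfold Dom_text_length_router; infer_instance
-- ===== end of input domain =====

-- B replaces A's indexed forward scan (early return at the first threshold ≥ len) by a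
-- backward overwrite-fold over zip(thresholds, destinations); return value only.

-- ===== PORT A =====
-- the 'for i, threshold in enumerate(thresholds): if length <= threshold: return destinations[i]'
-- loop; 'none' = fell through. destinations[i] is pyGetD: Pre_ keeps i in range (Python raises there).
def pvRouterLoop (length : Int) (pairs : List (Int × Int)) (destinations : List String) : Option String :=
  match pairs with
  | [] => none
  | (i, t) :: rest =>
      if length ≤ t then some (PySem.List.pyGetD destinations i "")
      else pvRouterLoop length rest destinations

def text_length_router (output : String) (output_type : String) (thresholds : List Int) (destinations : List String) : String :=
  if output_type ≠ "text" then PySem.List.pyGetD destinations (-1) ""   -- destinations[-1]; Pre_ keeps destinations ≠ []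
  else
    -- isinstance(output, str) always holds: output is a String here
    let length : Int := PySem.Str.len output
    match pvRouterLoop length (PySem.List.enumerate thresholds) destinations with
    | some d => d
    | none => PySem.List.pyGetD destinations (-1) ""

-- ===== PORT B =====
def text_length_router_alt (output : String) (output_type : String) (thresholds : List Int) (destinations : List String) : String :=
  if output_type ≠ "text" then PySem.List.pyGetD destinations (-1) ""
  else
    let length : Int := PySem.Str.len output
    ((thresholds.zip destinations).reverse).foldl
      (fun result td => if length ≤ td.1 then td.2 else result)
      (PySem.List.pyGetD destinations (-1) "")

-- ===== PRECONDITION & SPEC =====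
-- Pre_ excludes exactly the inputs where A raises IndexError: empty destinations, and (for text
-- output) a first matching threshold whose index lies beyond destinations.
def Pre_text_length_router (output : String) (output_type : String) (thresholds : List Int) (destinations : List String) : Prop :=
  destinations ≠ [] ∧
  (output_type = "text" →
    ∀ j ∈ List.findIdx? (fun t => decide (PySem.Str.len output ≤ t)) thresholds,
      j < destinations.length)
instance (output : String) (output_type : String) (thresholds : List Int) (destinations : List String) : Decidable (Pre_text_length_router output output_type thresholds destinations) := by unfold Pre_text_length_router; infer_instance

def pvWitness_text_length_router : String × String × List Int × List String :=
  ("hi", "text", [2, 5], ["short", "long"])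

def Spec_text_length_router (output : String) (output_type : String) (thresholds : List Int) (destinations : List String) (out : String) : Prop := out = text_length_router_alt output output_type thresholds destinations
instance (output : String) (output_type : String) (thresholds : List Int) (destinations : List String) (out : String) : Decidable (Spec_text_length_router output output_type thresholds destinations out) := by unfold Spec_text_length_router; infer_instance

-- ===== CLAIM (what is proved, stated in full; the proofs are below) =====
def Claim_equal_text_length_router : Prop := ∀ (output : String) (output_type : String) (thresholds : List Int) (destinations : List String), Dom_text_length_router output output_type thresholds destinations → Pre_text_length_router output output_type thresholds destinations → Spec_text_length_router output output_type thresholds destinations (text_length_router output output_type thresholds destinations)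


-- ===== LEMMAS AND PROOFS =====

-- B's backward overwrite-fold returns the FIRST match of the forward list (or the init value).
theorem pv_foldl_rev_eq_find (L : Int) (l : List (Int × String)) (init : String) :
    l.reverse.foldl (fun result td => if L ≤ td.1 then td.2 else result) init
      = ((l.find? (fun td => decide (L ≤ td.1))).map Prod.snd).getD init := by
  rw [List.foldl_reverse]
  induction l with
  | nil => simp
  | cons x xs ih => by_cases h : L ≤ x.1 <;> simp [List.find?, h, ih]

-- A's loop over enumerate returns destinations[first matching index] (offset s).
theorem pv_routerLoop_eq (L : Int) (ts : List Int) :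
    ∀ (s : Int) (ds : List String),
      pvRouterLoop L (PySem.List.enumerate ts s) ds
        = (List.findIdx? (fun t => decide (L ≤ t)) ts).map
            (fun (j : Nat) => PySem.List.pyGetD ds (s + (j : Int)) "") := by
  induction ts with
  | nil => intro s ds; simp [PySem.List.enumerate_nil, pvRouterLoop]
  | cons t ts ih =>
      intro s ds
      rw [PySem.List.enumerate_cons]
      by_cases h : L ≤ t
      · simp [pvRouterLoop, h, List.findIdx?_cons]
      · simp only [pvRouterLoop, h, if_false, List.findIdx?_cons, decide_eq_true_eq, ih]
        rw [Option.map_map]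
        congr 1
        funext j
        simp only [Function.comp]
        congr 1
        push_cast
        ring

-- the first matching index, projected through zip.
theorem pv_find_zip (L : Int) :
    ∀ (ts : List Int) (ds : List String) (j : Nat),
      List.findIdx? (fun t => decide (L ≤ t)) ts = some j → j < ds.length →
      ((ts.zip ds).find? (fun td => decide (L ≤ td.1))).map Prod.snd = ds[j]? := by
  intro ts
  induction ts with
  | nil => intro ds j hj _; simp at hj
  | cons t ts ih =>
      intro ds j hj hlt
      cases ds with
      | nil => simp at hlt
      | cons d ds =>
          rw [List.findIdx?_cons] at hj
          by_cases h : L ≤ t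
          · simp [h] at hj
            subst hj
            simp [h]
          · simp [h] at hj
            obtain ⟨j', hj', rfl⟩ := hj
            simp only [List.zip_cons_cons, List.find?, h, decide_false]
            simp only [List.length_cons, Nat.add_lt_add_iff_right] at hlt
            rw [ih ds j' hj' hlt]
            simp

-- no threshold matches: find? over the zip is none.
theorem pv_find_zip_none (L : Int) (ts : List Int) (ds : List String)
    (h : List.findIdx? (fun t => decide (L ≤ t)) ts = none) :
    (ts.zip ds).find? (fun td => decide (L ≤ td.1)) = none := by
  rw [List.findIdx?_eq_none_iff] at h
  rw [List.find?_eq_none]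
  intro td htd
  have := List.of_mem_zip htd
  simpa using h td.1 this.1

theorem text_length_router_eq (output output_type : String) (thresholds : List Int)
    (destinations : List String)
    (hpre : Pre_text_length_router output output_type thresholds destinations) :
    text_length_router output output_type thresholds destinations
      = text_length_router_alt output output_type thresholds destinations := by
  obtain ⟨hne, hidx⟩ := hpre
  unfold text_length_router text_length_router_alt
  by_cases hty : output_type = "text"
  · simp only [hty, ne_eq, not_true_eq_false, if_false]
    rw [pv_routerLoop_eq, pv_foldl_rev_eq_find]
    cases hfi : List.findIdx? (fun t => decide (PySem.Str.len output ≤ t)) thresholds with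
    | none =>
        rw [pv_find_zip_none _ _ _ hfi]
        simp
    | some j =>
        have hj : j < destinations.length := hidx hty j hfi
        rw [pv_find_zip _ _ _ _ hfi hj]
        simp [List.getElem?_eq_getElem hj, List.getD_eq_getElem?_getD]
  · simp [hty]

-- ===== VERDICT (by name: the statement is the Claim_ definition above) =====
theorem text_length_router_spec : Claim_equal_text_length_router := by
  intro output output_type thresholds destinations _ hpre
  unfold Spec_text_length_router
  exact text_length_router_eq output output_type thresholds destinations hpre
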